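-- pv_equiv track=rewrite | github.com/MerelMM/packetprint_analysis | src/c_similarity/input_lfm.py | make_ngram_labels
-- ===== SOURCE A (Python) =====
-- def make_ngram_labels(segment_labels, app_name, N):
--     labels = []
--     for i in range(1, len(segment_labels) - N):
--         if app_name in segment_labels[i - N : i + N + 1]:
--             labels.append(1)
--         else:
--             labels.append(0)
--     return labels
-- ===== SOURCE B (Python) =====
-- def make_ngram_labels(segment_labels, app_name, N):
--     L = len(segment_labels)
--     # prefix occurrence counts: pre[k] = number of matches among the first k labels
--     pre = [0]
--     c = 0
--     for s in segment_labels: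
--         if s == app_name:
--             c += 1
--         pre.append(c)
--     def clamp(x):
--         if x < 0:
--             x += L
--         if x < 0:
--             return 0
--         if x > L:
--             return L
--         return x
--     return [1 if pre[clamp(i + N + 1)] > pre[clamp(i - N)] else 0
--             for i in range(1, L - N)]
-- ===== Notes on version B (the rewrite author's own statement) =====
-- stated objective: faster
-- what changed: Replaces the per-position O(N) window slice-and-scan with a prefix occurrence-count array built once, so each label is a single comparison of two prefix counts (with Python's slice-bound clamping reproduced exactly).
import Mathlib
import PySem

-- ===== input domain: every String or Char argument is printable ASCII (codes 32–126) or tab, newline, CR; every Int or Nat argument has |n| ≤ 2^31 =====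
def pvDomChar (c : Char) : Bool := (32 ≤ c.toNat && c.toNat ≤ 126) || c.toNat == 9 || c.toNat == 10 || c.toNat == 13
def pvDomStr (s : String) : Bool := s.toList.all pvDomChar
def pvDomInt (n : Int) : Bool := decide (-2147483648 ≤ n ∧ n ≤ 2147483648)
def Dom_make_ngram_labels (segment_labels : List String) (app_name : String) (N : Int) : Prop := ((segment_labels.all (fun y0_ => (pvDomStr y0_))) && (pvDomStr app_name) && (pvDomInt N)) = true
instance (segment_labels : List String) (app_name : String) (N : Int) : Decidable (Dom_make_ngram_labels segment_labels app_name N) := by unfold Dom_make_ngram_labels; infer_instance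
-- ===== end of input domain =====

-- B replaces A's per-position O(N) window scan by a prefix occurrence count built once (O(L) total); return values are identical, Python's slice clamping included.

-- ===== PORT A =====
-- literal port: for i in range(1, len-N): append 1 if app_name in segment_labels[i-N : i+N+1] else 0
def make_ngram_labels (segment_labels : List String) (app_name : String) (N : Int) : List Int :=
  (PySem.List.pyRange 1 ((segment_labels.length : Int) - N) 1).foldl
    (fun labels i =>
      labels ++ [if app_name ∈ PySem.List.slice segment_labels (some (i - N)) (some (i + N + 1)) then (1 : Int) else 0])
    []

-- ===== PORT B =====
-- Source B's clamp(x): Python slice-bound normalisation (add L if negative, then clamp to [0, L])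
def pvClamp (L : Nat) (x : Int) : Nat :=
  if x < 0 then
    (if x + L < 0 then 0 else if x + L > (L : Int) then L else (x + L).toNat)
  else
    (if x > (L : Int) then L else x.toNat)

-- Source B's prefix-count loop: pre = [0]; c = 0; for s in segment_labels: c += (s == app_name); pre.append(c)
def pvPre (segment_labels : List String) (app_name : String) : List Nat :=
  (segment_labels.foldl
    (fun (st : List Nat × Nat) s =>
      let c := if s = app_name then st.2 + 1 else st.2
      (st.1 ++ [c], c))
    ([0], 0)).1

def make_ngram_labels_alt (segment_labels : List String) (app_name : String) (N : Int) : List Int :=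
  let L := segment_labels.length
  let pre := pvPre segment_labels app_name
  (PySem.List.pyRange 1 ((L : Int) - N) 1).map
    (fun i => if pre.getD (pvClamp L (i + N + 1)) 0 > pre.getD (pvClamp L (i - N)) 0 then (1 : Int) else 0)

-- ===== PRECONDITION & SPEC =====
def Spec_make_ngram_labels (segment_labels : List String) (app_name : String) (N : Int) (out : List Int) : Prop := out = make_ngram_labels_alt segment_labels app_name N
instance (segment_labels : List String) (app_name : String) (N : Int) (out : List Int) : Decidable (Spec_make_ngram_labels segment_labels app_name N out) := by unfold Spec_make_ngram_labels; infer_instance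

-- ===== CLAIM (what is proved, stated in full; the proofs are below) =====
def Claim_equal_make_ngram_labels : Prop := ∀ (segment_labels : List String) (app_name : String) (N : Int), Dom_make_ngram_labels segment_labels app_name N → Spec_make_ngram_labels segment_labels app_name N (make_ngram_labels segment_labels app_name N)

-- ===== LEMMAS AND PROOFS =====

-- Source B's clamp computes exactly PySem's slice-bound normalisation
theorem pvClamp_eq_clampIdx (L : Nat) (x : Int) : pvClamp L x = PySem.List.clampIdx L x := by
  unfold pvClamp PySem.List.clampIdx
  split_ifs <;> omega

-- invariant of the prefix-count loop
theorem pvPre_foldl (app_name : String) (xs : List String) (p : List Nat) (c : Nat) :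
    (xs.foldl
      (fun (st : List Nat × Nat) s =>
        let c := if s = app_name then st.2 + 1 else st.2
        (st.1 ++ [c], c))
      (p, c)).1
    = p ++ (List.range xs.length).map (fun k => c + (xs.take (k + 1)).count app_name) := by
  induction xs generalizing p c with
  | nil => simp
  | cons s xs ih =>
    simp only [List.foldl_cons, ih, List.length_cons, List.range_succ_eq_map, List.map_cons,
      List.map_map, List.append_assoc]
    congr 1
    simp only [List.take_succ_cons, List.count_cons, List.singleton_append, List.cons.injEq]
    constructor
    · simp only [List.take_zero, List.count_nil, beq_iff_eq]
      split_ifs with h <;> simp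
    · apply List.map_congr_left
      intro k _
      simp only [Function.comp_apply, beq_iff_eq]
      split_ifs with h
      · simp; omega
      · simp

theorem pvPre_getD (segment_labels : List String) (app_name : String) (k : Nat)
    (hk : k ≤ segment_labels.length) :
    (pvPre segment_labels app_name).getD k 0 = (segment_labels.take k).count app_name := by
  unfold pvPre
  rw [pvPre_foldl]
  cases k with
  | zero => simp
  | succ j =>
    have hj : j < segment_labels.length := by omega
    simp [List.getD, hj]

-- membership in a slice, as a strict growth of prefix counts
theorem mem_slice_iff_count (xs : List String) (app : String) (a b : Int) :
    (app ∈ PySem.List.slice xs (some a) (some b)) ↔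
      (xs.take (PySem.List.clampIdx xs.length a)).count app
        < (xs.take (PySem.List.clampIdx xs.length b)).count app := by
  set s := PySem.List.clampIdx xs.length a with hs
  set e := PySem.List.clampIdx xs.length b with he
  have hslice : PySem.List.slice xs (some a) (some b) = (xs.drop s).take (e - s) := rfl
  rw [hslice, ← List.count_pos_iff]
  by_cases hse : e ≤ s
  · have h0 : e - s = 0 := by omega
    have hle : (xs.take e).count app ≤ (xs.take s).count app := by
      have ht : xs.take e = (xs.take s).take e := by rw [List.take_take]; congr 1; omega
      rw [ht]
      exact (List.take_sublist _ _).count_le app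
    rw [h0]
    simp only [List.take_zero, List.count_nil]
    omega
  · have hsplit : xs.take e = xs.take s ++ (xs.drop s).take (e - s) := by
      calc xs.take e = xs.take (s + (e - s)) := by congr 1; omega
        _ = xs.take s ++ (xs.drop s).take (e - s) := List.take_add
    rw [hsplit, List.count_append]
    omega

-- ===== VERDICT (by name: the statement is the Claim_ definition above) =====
theorem make_ngram_labels_spec : Claim_equal_make_ngram_labels := by
  intro segment_labels app_name N _
  unfold Spec_make_ngram_labels make_ngram_labels make_ngram_labels_alt
  rw [PySem.List.foldl_append_singleton_eq_map
      (fun i => if app_name ∈ PySem.List.slice segment_labels (some (i - N)) (some (i + N + 1)) then (1 : Int) else 0)]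
  simp only [List.nil_append]
  apply List.map_congr_left
  intro i _
  have ha := pvClamp_eq_clampIdx segment_labels.length (i - N)
  have hb := pvClamp_eq_clampIdx segment_labels.length (i + N + 1)
  have hal : PySem.List.clampIdx segment_labels.length (i - N) ≤ segment_labels.length :=
    PySem.List.clampIdx_le _ _
  have hbl : PySem.List.clampIdx segment_labels.length (i + N + 1) ≤ segment_labels.length :=
    PySem.List.clampIdx_le _ _
  rw [ha, hb, pvPre_getD _ _ _ hal, pvPre_getD _ _ _ hbl]
  by_cases h : app_name ∈ PySem.List.slice segment_labels (some (i - N)) (some (i + N + 1))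
  · rw [if_pos h, if_pos ((mem_slice_iff_count _ _ _ _).mp h)]
  · rw [if_neg h, if_neg (fun hc => h ((mem_slice_iff_count _ _ _ _).mpr hc))]
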